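-- pv_equiv track=rewrite | github.com/blas1n/Algorithm | HackerRank/algorithm/Place_N_Cameras_Without_Conflict_on_Blocked_Grid.py | canPlaceSecurityCameras
-- ===== SOURCE A (Python) =====
-- def canPlaceSecurityCameras(N, grid):
--     used_cols = set()
--     used_diag1 = set()
--     used_diag2 = set()
--
--     def isSafe(row, col):
--         if grid[row][col] == 1:
--             return False
--         if col in used_cols:
--             return False
--         if (row - col) in used_diag1:
--             return False
--         if (row + col) in used_diag2:
--             return False
--         return True
--
--     def backTrack(row):
--         if row >= N:
--             return True
--
--         has_valid_position = False
--         for col in range(N):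
--             if isSafe(row, col):
--                 has_valid_position = True
--                 break
--
--         if not has_valid_position:
--             return False
--
--         for col in range(N):
--             if isSafe(row, col):
--                 grid[row][col] = 2
--                 used_cols.add(col)
--                 used_diag1.add(row - col)
--                 used_diag2.add(row + col)
--
--                 if backTrack(row + 1):
--                     return True
--
--                 grid[row][col] = 0
--                 used_cols.remove(col)
--                 used_diag1.remove(row - col)
--                 used_diag2.remove(row + col)
--
--         return False
--
--     return backTrack(0)
-- ===== SOURCE B (Python) =====
-- def canPlaceSecurityCameras(N, grid):
--     # Breadth-first: frontier holds every conflict-free placement (tuple of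
--     # columns, one per processed row); expand it one whole row at a time.
--     frontier = [()]
--     for row in range(N):
--         frontier = [p + (col,)
--                     for p in frontier
--                     for col in range(N)
--                     if grid[row][col] != 1
--                     and all(c != col and r - c != row - col and r + c != row + col
--                             for r, c in enumerate(p))]
--         if not frontier:
--             return False
--     return True
-- ===== Notes on version B (the rewrite author's own statement) =====
-- stated objective: alternative
-- what changed: B replaces A's depth-first backtracking (recursion, in-place grid marking/unmarking, incrementally maintained conflict sets, per-row feasibility prescan) with a breadth-first level-by-level expansion: a frontier list of ALL conflict-free partial placements is rebuilt row by row with no recursion, no mutation and no undo, answering True iff the frontier survives all N rows; the traversal order differs but existence of a full placement is the same.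
-- outside the precondition, e.g. on canPlaceSecurityCameras(2, [[1, 1]]): A returns False, B returns False
import Mathlib
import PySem

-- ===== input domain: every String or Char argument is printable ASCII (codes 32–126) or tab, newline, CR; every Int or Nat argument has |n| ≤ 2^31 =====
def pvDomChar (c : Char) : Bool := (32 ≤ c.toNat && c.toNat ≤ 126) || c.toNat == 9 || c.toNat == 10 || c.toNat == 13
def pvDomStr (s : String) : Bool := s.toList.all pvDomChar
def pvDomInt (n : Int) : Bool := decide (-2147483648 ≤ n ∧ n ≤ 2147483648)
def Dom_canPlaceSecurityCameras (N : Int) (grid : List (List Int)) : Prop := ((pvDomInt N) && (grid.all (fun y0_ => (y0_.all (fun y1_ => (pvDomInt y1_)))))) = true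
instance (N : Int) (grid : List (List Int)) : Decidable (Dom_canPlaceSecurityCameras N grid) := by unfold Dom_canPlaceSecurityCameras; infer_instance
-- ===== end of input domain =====

-- B replaces A's depth-first backtracking (recursion, grid mutation, conflict sets) with a
-- breadth-first row-by-row expansion of the list of ALL conflict-free partial placements —
-- objective: alternative.  A mutates `grid` in place (marks chosen cells 2, resets them to 0
-- on backtracking); B does not: the equivalence proved here is about the RETURN value only.

-- ===== PORT A =====
-- grid[row][col] : exact for the nonnegative in-range indices this program reads
-- (row and col always come from range(N), and Pre_ makes those reads in range).
def pvCell (g : List (List Int)) (row col : Int) : Int :=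
  (g.getD row.toNat []).getD col.toNat 0

-- grid[row][col] = v : exact for the nonnegative in-range indices this program writes
-- (a cell is only written after isSafe read it, so row, col ∈ range(N) and in range).
def pvSetCell (g : List (List Int)) (row col v : Int) : List (List Int) :=
  g.set row.toNat ((g.getD row.toNat []).set col.toNat v)

def aIsSafe (g : List (List Int)) (c1 c2 c3 : PySem.Set Int) (row col : Int) : Bool :=
  if pvCell g row col == 1 then false
  else if PySem.Set.contains c1 col then false
  else if PySem.Set.contains c2 (row - col) then false
  else if PySem.Set.contains c3 (row + col) then false
  else true

-- backTrack, with the mutated state (grid, used_cols, used_diag1, used_diag2) threaded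
-- explicitly; fuel = number of remaining recursion levels (N.toNat at the top, one per row —
-- the fuel-0 branch is unreachable from the entry point).  `set.remove x` is ported as
-- Set.discard: the removed element was added on the same branch, so it is always present.
mutual
def aBack (N : Int) (fuel : Nat) (row : Int) (g : List (List Int))
    (c1 c2 c3 : PySem.Set Int) :
    Bool × List (List Int) × PySem.Set Int × PySem.Set Int × PySem.Set Int :=
  if N ≤ row then (true, g, c1, c2, c3)
  else
    match fuel with
    | 0 => (false, g, c1, c2, c3)
    | f + 1 =>
      -- first loop: has_valid_position
      if (PySem.List.pyRange 0 N 1).any (fun col => aIsSafe g c1 c2 c3 row col) then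
        -- second loop over range(N)
        aCols N f row (PySem.List.pyRange 0 N 1) g c1 c2 c3
      else (false, g, c1, c2, c3)
  termination_by (fuel, 0)

def aCols (N : Int) (fuel : Nat) (row : Int) (cols : List Int) (g : List (List Int))
    (c1 c2 c3 : PySem.Set Int) :
    Bool × List (List Int) × PySem.Set Int × PySem.Set Int × PySem.Set Int :=
  match cols with
  | [] => (false, g, c1, c2, c3)
  | col :: rest =>
    if aIsSafe g c1 c2 c3 row col then
      let r := aBack N fuel (row + 1) (pvSetCell g row col 2)
        (PySem.Set.add c1 col) (PySem.Set.add c2 (row - col)) (PySem.Set.add c3 (row + col))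
      if r.1 then r
      else
        aCols N fuel row rest (pvSetCell r.2.1 row col 0)
          (PySem.Set.discard r.2.2.1 col) (PySem.Set.discard r.2.2.2.1 (row - col))
          (PySem.Set.discard r.2.2.2.2 (row + col))
    else aCols N fuel row rest g c1 c2 c3
  termination_by (fuel, cols.length + 1)
end

def canPlaceSecurityCameras (N : Int) (grid : List (List Int)) : Bool :=
  (aBack N N.toNat 0 grid PySem.Set.empty PySem.Set.empty PySem.Set.empty).1

-- ===== PORT B =====
-- the comprehension's filter condition: grid[row][col] != 1 and all(...)
def bSafe (grid : List (List Int)) (placed : List Int) (row col : Int) : Bool :=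
  if pvCell grid row col == 1 then false
  else (PySem.List.enumerate placed 0).all
    (fun rc => rc.2 != col && rc.1 - rc.2 != row - col && rc.1 + rc.2 != row + col)

-- the comprehension rebuilding the frontier for one row
def bRowStep (N : Int) (grid : List (List Int)) (row : Int) (fr : List (List Int)) :
    List (List Int) :=
  fr.flatMap (fun p =>
    ((PySem.List.pyRange 0 N 1).filter (fun col => bSafe grid p row col)).map
      (fun col => p ++ [col]))

-- the `for row in range(N)` loop with its early `return False`
def bLoop (N : Int) (grid : List (List Int)) : List Int → List (List Int) → Bool
  | [], _ => true
  | row :: rest, fr =>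
    let fr' := bRowStep N grid row fr
    if fr' = [] then false else bLoop N grid rest fr'

def canPlaceSecurityCameras_alt (N : Int) (grid : List (List Int)) : Bool :=
  bLoop N grid (PySem.List.pyRange 0 N 1) [[]]

-- ===== PRECONDITION & SPEC =====
-- Pre_ excludes grids with fewer than N rows or with a row among the first N shorter than N:
-- there A in general raises IndexError (on some such grids every reachable cell is blocked
-- and A still returns False before touching the missing cells — those are excluded too).
def Pre_canPlaceSecurityCameras (N : Int) (grid : List (List Int)) : Prop :=
  N ≤ (grid.length : Int) ∧ ∀ r ∈ grid.take N.toNat, N ≤ (r.length : Int)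
instance (N : Int) (grid : List (List Int)) : Decidable (Pre_canPlaceSecurityCameras N grid) := by unfold Pre_canPlaceSecurityCameras; infer_instance

def pvWitness_canPlaceSecurityCameras : Int × List (List Int) := (1, [[0]])

def Spec_canPlaceSecurityCameras (N : Int) (grid : List (List Int)) (out : Bool) : Prop := out = canPlaceSecurityCameras_alt N grid
instance (N : Int) (grid : List (List Int)) (out : Bool) : Decidable (Spec_canPlaceSecurityCameras N grid out) := by unfold Spec_canPlaceSecurityCameras; infer_instance

-- ===== CLAIM (what is proved, stated in full; the proofs are below) =====
def Claim_equal_canPlaceSecurityCameras : Prop := ∀ (N : Int) (grid : List (List Int)), Dom_canPlaceSecurityCameras N grid → Pre_canPlaceSecurityCameras N grid → Spec_canPlaceSecurityCameras N grid (canPlaceSecurityCameras N grid)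

-- ===== LEMMAS AND PROOFS =====

-- proof-side reference: the pure depth-first recursion both ports are compared against
def bSolve (N : Int) (grid : List (List Int)) (fuel : Nat) (placed : List Int) : Bool :=
  if N ≤ (placed.length : Int) then true
  else
    match fuel with
    | 0 => false
    | f + 1 =>
      (PySem.List.pyRange 0 N 1).any
        (fun col => bSafe grid placed (placed.length : Int) col && bSolve N grid f (placed ++ [col]))
  termination_by fuel

-- "the two grids agree on which cells hold 1" — the only thing isSafe reads from the grid.
def pvBlockedEq (g g0 : List (List Int)) : Prop :=
  ∀ row col : Int, (pvCell g row col = 1 ↔ pvCell g0 row col = 1)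

-- the three conflict sets have exactly the members determined by the placement list
def pvRel (placed : List Int) (c1 c2 c3 : PySem.Set Int) : Prop :=
  (∀ x : Int, x ∈ c1 ↔ x ∈ placed) ∧
  (∀ x : Int, x ∈ c2 ↔ ∃ p ∈ PySem.List.enumerate placed 0, x = p.1 - p.2) ∧
  (∀ x : Int, x ∈ c3 ↔ ∃ p ∈ PySem.List.enumerate placed 0, x = p.1 + p.2)

theorem pv_discard_add {s : PySem.Set Int} {x : Int} (h : x ∉ s) :
    PySem.Set.discard (PySem.Set.add s x) x = s := by
  rw [PySem.Set.add_of_not_mem h]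
  unfold PySem.Set.discard
  rw [List.filter_append]
  simp only [List.filter_cons, List.filter_nil]
  rw [List.filter_eq_self.mpr]
  · simp
  · intro a ha; simp; rintro rfl; exact h ha

theorem pv_getD_set {α : Type} (l : List α) (i j : Nat) (a d : α) :
    (l.set i a).getD j d = if j = i ∧ i < l.length then a else l.getD j d := by
  simp only [List.getD_eq_getElem?_getD, List.getElem?_set]
  split_ifs with h1 h2 h3 <;> simp_all

theorem pv_blockedEq_setCell (g : List (List Int)) (row col v : Int) (hv : v ≠ 1)
    (h : pvCell g row col ≠ 1) : pvBlockedEq (pvSetCell g row col v) g := by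
  intro r c
  unfold pvCell pvSetCell
  rw [pv_getD_set]
  split_ifs with ho
  · rw [pv_getD_set]
    split_ifs with hi
    · rw [ho.1, hi.1]
      unfold pvCell at h
      constructor
      · intro hx; exact absurd hx hv
      · intro hx; exact absurd hx h
    · rw [ho.1]
  · exact Iff.rfl

theorem pv_safe_eq (g g0 : List (List Int)) (placed : List Int)
    (c1 c2 c3 : PySem.Set Int) (col : Int)
    (hB : pvBlockedEq g g0) (hR : pvRel placed c1 c2 c3) :
    aIsSafe g c1 c2 c3 (placed.length : Int) col
      = bSafe g0 placed (placed.length : Int) col := by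
  obtain ⟨h1, h2, h3⟩ := hR
  have hmem : ∀ y : Int, y ∈ placed ↔ ∃ p ∈ PySem.List.enumerate placed 0, p.2 = y := by
    intro y
    conv_lhs => rw [← PySem.List.map_snd_enumerate placed 0]
    exact List.mem_map
  have hcell := hB (placed.length : Int) col
  unfold aIsSafe bSafe
  by_cases hb : pvCell g0 (placed.length : Int) col = 1
  · simp [hb, hcell.mpr hb]
  · have hb' : ¬ pvCell g (placed.length : Int) col = 1 := fun hx => hb (hcell.mp hx)
    simp only [beq_iff_eq, hb, hb', if_neg, not_false_iff]
    split_ifs with s1 s2 s3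
    · obtain ⟨p, hp, hpc⟩ := (hmem col).mp ((h1 col).mp ((PySem.Set.contains_iff _ _).mp s1))
      symm; rw [List.all_eq_false]
      exact ⟨p, hp, by simp [hpc]⟩
    · obtain ⟨p, hp, hpc⟩ := (h2 _).mp ((PySem.Set.contains_iff _ _).mp s2)
      symm; rw [List.all_eq_false]
      exact ⟨p, hp, by simp [← hpc]⟩
    · obtain ⟨p, hp, hpc⟩ := (h3 _).mp ((PySem.Set.contains_iff _ _).mp s3)
      symm; rw [List.all_eq_false]
      exact ⟨p, hp, by simp [← hpc]⟩
    · symm; rw [List.all_eq_true]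
      intro p hp
      simp only [bne_iff_ne, Bool.and_eq_true, ne_eq]
      refine ⟨⟨?_, ?_⟩, ?_⟩
      · intro hpc
        exact s1 ((PySem.Set.contains_iff _ _).mpr ((h1 col).mpr ((hmem col).mpr ⟨p, hp, hpc⟩)))
      · intro hpc
        exact s2 ((PySem.Set.contains_iff _ _).mpr ((h2 _).mpr ⟨p, hp, hpc.symm⟩))
      · intro hpc
        exact s3 ((PySem.Set.contains_iff _ _).mpr ((h3 _).mpr ⟨p, hp, hpc.symm⟩))

theorem pv_rel_nil : pvRel [] PySem.Set.empty PySem.Set.empty PySem.Set.empty := by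
  refine ⟨?_, ?_, ?_⟩ <;> intro x <;> simp [PySem.Set.empty, PySem.List.enumerate]

theorem pv_rel_snoc {placed : List Int} {c1 c2 c3 : PySem.Set Int}
    (hR : pvRel placed c1 c2 c3) (col : Int) :
    pvRel (placed ++ [col]) (PySem.Set.add c1 col)
      (PySem.Set.add c2 ((placed.length : Int) - col))
      (PySem.Set.add c3 ((placed.length : Int) + col)) := by
  obtain ⟨h1, h2, h3⟩ := hR
  refine ⟨?_, ?_, ?_⟩ <;> intro x <;>
    rw [PySem.Set.mem_add] <;>
    simp [h1, h2, h3, PySem.List.enumerate_append, PySem.List.enumerate_cons,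
      PySem.List.enumerate_nil] <;>
    constructor
  · rintro (⟨a, b, hm, hx⟩ | rfl)
    · exact ⟨a, b, Or.inl hm, hx⟩
    · exact ⟨_, _, Or.inr ⟨rfl, rfl⟩, rfl⟩
  · rintro ⟨a, b, hm | ⟨rfl, rfl⟩, hx⟩
    · exact Or.inl ⟨a, b, hm, hx⟩
    · exact Or.inr hx
  · rintro (⟨a, b, hm, hx⟩ | rfl)
    · exact ⟨a, b, Or.inl hm, hx⟩
    · exact ⟨_, _, Or.inr ⟨rfl, rfl⟩, rfl⟩
  · rintro ⟨a, b, hm | ⟨rfl, rfl⟩, hx⟩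
    · exact Or.inl ⟨a, b, hm, hx⟩
    · exact Or.inr hx

theorem pv_safe_facts {g : List (List Int)} {c1 c2 c3 : PySem.Set Int} {row col : Int}
    (hs : aIsSafe g c1 c2 c3 row col = true) :
    pvCell g row col ≠ 1 ∧ col ∉ c1 ∧ (row - col) ∉ c2 ∧ (row + col) ∉ c3 := by
  unfold aIsSafe at hs
  split_ifs at hs with t1 t2 t3 t4
  refine ⟨by simpa using t1, ?_, ?_, ?_⟩
  · exact fun hm => t2 ((PySem.Set.contains_iff _ _).mpr hm)
  · exact fun hm => t3 ((PySem.Set.contains_iff _ _).mpr hm)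
  · exact fun hm => t4 ((PySem.Set.contains_iff _ _).mpr hm)

-- what pv_main asserts of a call to aBack at fuel f, row = placed.length
def pvBackOk (f : Nat) (N : Int) (placed : List Int) (g g0 : List (List Int))
    (c1 c2 c3 : PySem.Set Int) : Prop :=
  (aBack N f (placed.length : Int) g c1 c2 c3).1 = bSolve N g0 f placed ∧
  ((aBack N f (placed.length : Int) g c1 c2 c3).1 = false →
    pvBlockedEq (aBack N f (placed.length : Int) g c1 c2 c3).2.1 g0 ∧
    (aBack N f (placed.length : Int) g c1 c2 c3).2.2.1 = c1 ∧
    (aBack N f (placed.length : Int) g c1 c2 c3).2.2.2.1 = c2 ∧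
    (aBack N f (placed.length : Int) g c1 c2 c3).2.2.2.2 = c3)

theorem pv_cols (f : Nat) (N : Int)
    (IH : ∀ placed g g0 c1 c2 c3, pvBlockedEq g g0 → pvRel placed c1 c2 c3 →
      pvBackOk f N placed g g0 c1 c2 c3) :
    ∀ (cols : List Int) (placed : List Int) (g g0 : List (List Int))
      (c1 c2 c3 : PySem.Set Int), pvBlockedEq g g0 → pvRel placed c1 c2 c3 →
    (aCols N f (placed.length : Int) cols g c1 c2 c3).1
      = cols.any (fun col => bSafe g0 placed (placed.length : Int) col
          && bSolve N g0 f (placed ++ [col])) ∧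
    ((aCols N f (placed.length : Int) cols g c1 c2 c3).1 = false →
      pvBlockedEq (aCols N f (placed.length : Int) cols g c1 c2 c3).2.1 g0 ∧
      (aCols N f (placed.length : Int) cols g c1 c2 c3).2.2.1 = c1 ∧
      (aCols N f (placed.length : Int) cols g c1 c2 c3).2.2.2.1 = c2 ∧
      (aCols N f (placed.length : Int) cols g c1 c2 c3).2.2.2.2 = c3) := by
  intro cols
  induction cols with
  | nil =>
    intro placed g g0 c1 c2 c3 hB hR
    rw [aCols]
    exact ⟨rfl, fun _ => ⟨hB, rfl, rfl, rfl⟩⟩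
  | cons col rest ihc =>
    intro placed g g0 c1 c2 c3 hB hR
    have hsafe := pv_safe_eq g g0 placed c1 c2 c3 col hB hR
    rw [aCols]
    simp only []
    by_cases hs : aIsSafe g c1 c2 c3 (placed.length : Int) col = true
    · have hsB : bSafe g0 placed (placed.length : Int) col = true := hsafe ▸ hs
      obtain ⟨hc, m1, m2, m3⟩ := pv_safe_facts hs
      have hB1 : pvBlockedEq (pvSetCell g (placed.length : Int) col 2) g0 :=
        fun a b => ((pv_blockedEq_setCell g _ col 2 (by decide) hc) a b).trans (hB a b)
      have hIH := IH (placed ++ [col]) (pvSetCell g (placed.length : Int) col 2) g0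
        (PySem.Set.add c1 col) (PySem.Set.add c2 ((placed.length : Int) - col))
        (PySem.Set.add c3 ((placed.length : Int) + col)) hB1 (pv_rel_snoc hR col)
      unfold pvBackOk at hIH
      have hlen : ((placed ++ [col]).length : Int) = (placed.length : Int) + 1 := by simp
      rw [hlen] at hIH
      rw [if_pos hs]
      by_cases hv1 : (aBack N f ((placed.length : Int) + 1)
          (pvSetCell g (placed.length : Int) col 2) (PySem.Set.add c1 col)
          (PySem.Set.add c2 ((placed.length : Int) - col))
          (PySem.Set.add c3 ((placed.length : Int) + col))).1 = true
      · rw [if_pos hv1]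
        refine ⟨?_, fun hf => absurd (hf ▸ hv1) (by simp)⟩
        rw [hv1, List.any_cons, hsB, ← hIH.1, hv1]
        simp
      · have hv1' := Bool.not_eq_true _ ▸ hv1
        obtain ⟨hBr, e1, e2, e3⟩ := hIH.2 hv1'
        rw [if_neg hv1, e1, e2, e3, pv_discard_add m1, pv_discard_add m2, pv_discard_add m3]
        have hc0 : pvCell (aBack N f ((placed.length : Int) + 1)
            (pvSetCell g (placed.length : Int) col 2) (PySem.Set.add c1 col)
            (PySem.Set.add c2 ((placed.length : Int) - col))
            (PySem.Set.add c3 ((placed.length : Int) + col))).2.1 (placed.length : Int) col ≠ 1 :=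
          fun hx => hc ((hB _ col).mpr ((hBr _ col).mp hx))
        have hB3 : pvBlockedEq (pvSetCell (aBack N f ((placed.length : Int) + 1)
            (pvSetCell g (placed.length : Int) col 2) (PySem.Set.add c1 col)
            (PySem.Set.add c2 ((placed.length : Int) - col))
            (PySem.Set.add c3 ((placed.length : Int) + col))).2.1 (placed.length : Int) col 0) g0 :=
          fun a b => ((pv_blockedEq_setCell _ _ col 0 (by decide) hc0) a b).trans (hBr a b)
        have hrest := ihc placed _ g0 c1 c2 c3 hB3 hR
        refine ⟨?_, hrest.2⟩
        rw [hrest.1, List.any_cons, hsB, ← hIH.1, hv1']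
        simp
    · rw [if_neg hs]
      have hsB : bSafe g0 placed (placed.length : Int) col = false := by
        rw [← hsafe]; exact Bool.not_eq_true _ ▸ hs
      have hrest := ihc placed g g0 c1 c2 c3 hB hR
      refine ⟨?_, hrest.2⟩
      rw [hrest.1, List.any_cons, hsB]
      simp

theorem pv_main : ∀ (f : Nat) (N : Int) (placed : List Int) (g g0 : List (List Int))
    (c1 c2 c3 : PySem.Set Int), pvBlockedEq g g0 → pvRel placed c1 c2 c3 →
    pvBackOk f N placed g g0 c1 c2 c3 := by
  intro f
  induction f with
  | zero =>
    intro N placed g g0 c1 c2 c3 hB hR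
    unfold pvBackOk
    rw [aBack, bSolve]
    split_ifs with h
    · exact ⟨rfl, by simp⟩
    · exact ⟨rfl, fun _ => ⟨hB, rfl, rfl, rfl⟩⟩
  | succ f IH =>
    intro N placed g g0 c1 c2 c3 hB hR
    unfold pvBackOk
    rw [aBack, bSolve]
    split_ifs with h hv
    · exact ⟨rfl, by simp⟩
    · exact pv_cols f N (IH N) (PySem.List.pyRange 0 N 1) placed g g0 c1 c2 c3 hB hR
    · refine ⟨?_, fun _ => ⟨hB, rfl, rfl, rfl⟩⟩
      symm
      rw [List.any_eq_false]
      intro col hc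
      have hse := pv_safe_eq g g0 placed c1 c2 c3 col hB hR
      rw [Bool.not_eq_true, List.any_eq_false] at hv
      intro hx
      rw [Bool.and_eq_true] at hx
      exact absurd (hse.trans hx.1) (by simpa using hv col hc)

-- one BFS row expansion commutes with "some frontier element solves the rest"
theorem pv_step_any (N : Int) (g : List (List Int)) (f : Nat) (r : Int) :
    ∀ (fr : List (List Int)), ¬ N ≤ r → (∀ p ∈ fr, (p.length : Int) = r) →
    (bRowStep N g r fr).any (fun q => bSolve N g f q)
      = fr.any (fun p => bSolve N g (f + 1) p) := by
  intro fr
  induction fr with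
  | nil => intro _ _; rfl
  | cons p rest ih =>
    intro hr hlen
    have hp : ((p.length : Nat) : Int) = r := hlen p (by simp)
    have hstep : (((PySem.List.pyRange 0 N 1).filter (fun col => bSafe g p r col)).map
        (fun col => p ++ [col])).any (fun q => bSolve N g f q) = bSolve N g (f + 1) p := by
      conv_rhs => rw [bSolve.eq_def]
      rw [hp, if_neg hr]
      simp only [List.any_map, List.any_filter, Function.comp]
    unfold bRowStep
    rw [List.flatMap_cons, List.any_append, hstep]
    unfold bRowStep at ih
    rw [ih hr (fun q hq => hlen q (by simp [hq]))]
    simp [List.any_cons]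

-- the BFS loop over the remaining rows equals "some frontier element solves the rest"
theorem pv_bfs : ∀ (f : Nat) (N : Int) (g : List (List Int)) (r : Int)
    (fr : List (List Int)), N = r + f → fr ≠ [] → (∀ p ∈ fr, (p.length : Int) = r) →
    bLoop N g (PySem.List.pyRange r N 1) fr = fr.any (fun p => bSolve N g f p) := by
  intro f
  induction f with
  | zero =>
    intro N g r fr hN hne hlen
    rw [PySem.List.pyRange_one_eq_nil (by omega), bLoop]
    obtain ⟨p, hp⟩ := List.exists_mem_of_ne_nil fr hne
    symm
    rw [List.any_eq_true]
    refine ⟨p, hp, ?_⟩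
    rw [bSolve, if_pos (by rw [hlen p hp]; omega)]
  | succ f IH =>
    intro N g r fr hN hne hlen
    have hr : ¬ N ≤ r := by omega
    rw [PySem.List.pyRange_one_cons (by omega), bLoop]
    by_cases he : bRowStep N g r fr = []
    · rw [if_pos he, ← pv_step_any N g f r fr hr hlen, he]
      rfl
    · rw [if_neg he]
      have hlen' : ∀ p ∈ bRowStep N g r fr, (p.length : Int) = r + 1 := by
        intro p hp
        unfold bRowStep at hp
        rw [List.mem_flatMap] at hp
        obtain ⟨q, hq, hp⟩ := hp
        rw [List.mem_map] at hp
        obtain ⟨col, _, rfl⟩ := hp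
        simp [hlen q hq]
      rw [IH N g (r + 1) (bRowStep N g r fr) (by omega) he hlen']
      exact pv_step_any N g f r fr hr hlen

-- ===== VERDICT (by name: the statement is the Claim_ definition above) =====
theorem canPlaceSecurityCameras_spec : Claim_equal_canPlaceSecurityCameras := by
  intro N grid _ _
  unfold Spec_canPlaceSecurityCameras canPlaceSecurityCameras canPlaceSecurityCameras_alt
  have h := (pv_main N.toNat N [] grid grid PySem.Set.empty PySem.Set.empty PySem.Set.empty
    (fun _ _ => Iff.rfl) pv_rel_nil).1
  by_cases hN : N ≤ 0
  · rw [PySem.List.pyRange_one_eq_nil hN, bLoop]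
    have h' : bSolve N grid N.toNat [] = true := by
      rw [bSolve.eq_def, if_pos (by simpa using hN)]
    simpa using h.trans h'
  · rw [pv_bfs N.toNat N grid 0 [[]] (by omega) (by simp) (by simp)]
    simpa using h
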